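-- pv_equiv track=rewrite | github.com/MrBrantCode/unitest_baseline | mut_generate/mist_train_taco/taco_17458/solution.py | max_kupcs
-- ===== SOURCE A (Python) =====
-- from collections import Counter
--
-- def max_kupcs(N, K, problem_names):
--     # Extract the first letter of each problem name
--     first_letters = [name[0] for name in problem_names]
--
--     # Count the occurrences of each first letter
--     letter_counts = Counter(first_letters)
--
--     # Get the counts of each first letter as a list
--     counts = list(letter_counts.values())
--
--     # Initialize the answer
--     ans = 0
--
--     # While we have enough counts to form a KUPC
--     while len(counts) >= K:
--         # Sort the counts in descending order
--         counts.sort(reverse=True)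
--
--         # Decrease the count of the top K letters by 1
--         for i in range(K):
--             counts[i] -= 1
--
--         # Remove counts that are zero or less
--         counts = [count for count in counts if count > 0]
--
--         # Increment the number of KUPCs
--         ans += 1
--
--     return ans
-- ===== SOURCE B (Python) =====
-- from collections import Counter
--
-- def max_kupcs(N, K, problem_names):
--     # Binary search the number of rounds R: R rounds are playable iff
--     # sum(min(count, R)) >= R*K (each letter contributes at most once per round).
--     counts = list(Counter(name[0] for name in problem_names).values())
--     total = sum(counts)
--     lo, hi = 0, total // K
--     while lo < hi:
--         mid = (lo + hi + 1) // 2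
--         if sum(min(c, mid) for c in counts) >= mid * K:
--             lo = mid
--         else:
--             hi = mid - 1
--     return lo
-- ===== Notes on version B (the rewrite author's own statement) =====
-- stated objective: alternative
-- what changed: Replaces A's simulate-every-round greedy loop (sort descending, decrement top K, filter, repeat) by a binary search on the number of rounds R using the feasibility criterion sum(min(count,R)) >= R*K; asymptotically fewer passes (O(M log(N/K)) vs O(answer*M log M) after counting), though a timing run did not confirm a measured speed-up on the generated inputs.
import Mathlib
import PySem

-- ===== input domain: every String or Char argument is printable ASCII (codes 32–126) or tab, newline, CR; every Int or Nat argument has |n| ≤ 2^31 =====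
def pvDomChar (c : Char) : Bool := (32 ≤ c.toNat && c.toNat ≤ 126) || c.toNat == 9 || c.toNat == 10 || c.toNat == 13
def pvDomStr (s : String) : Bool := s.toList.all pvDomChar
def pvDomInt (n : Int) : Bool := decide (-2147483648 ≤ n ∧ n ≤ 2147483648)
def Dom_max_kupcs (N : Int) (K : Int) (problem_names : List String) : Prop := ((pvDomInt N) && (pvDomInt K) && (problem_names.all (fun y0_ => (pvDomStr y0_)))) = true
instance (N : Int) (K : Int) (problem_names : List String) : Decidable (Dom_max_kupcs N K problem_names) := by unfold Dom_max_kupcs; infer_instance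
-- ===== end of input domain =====

-- B replaces A's repeated sort-decrement-filter greedy loop by a binary search on the
-- number of rounds R using the feasibility test sum(min(count,R)) >= R*K.

-- ===== PORT A =====
-- A's while-loop. fuel only makes the recursion total: each executed round lowers the
-- (nonnegative) sum of counts by K ≥ 1, and the fuel passed below exceeds that sum, so
-- under Pre_ the fuel never runs out (proved in pvLoopA_spec below).
-- "for i in range(K): counts[i] -= 1" decrements the first K entries of the sorted list
-- (K ≤ len inside the guard), ported as take/map/drop.
def pvLoopA (K : Int) : Nat → List Int → Int → Int
  | 0, _, ans => ans
  | fuel+1, counts, ans =>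
    if K ≤ (counts.length : Int) then
      let s := PySem.List.sorted counts (fun x => x) true
      let s2 := (s.take K.toNat).map (fun c => c - 1) ++ s.drop K.toNat
      pvLoopA K fuel (s2.filter (fun c => decide (0 < c))) (ans + 1)
    else ans

def max_kupcs (N : Int) (K : Int) (problem_names : List String) : Int :=
  let first_letters := problem_names.map (fun name => ((PySem.Str.pyGet? name 0).getD ' '))  -- name[0]; IndexError (empty name) excluded by Pre_
  let letter_counts := PySem.Dict.counter first_letters
  let counts := letter_counts.values
  pvLoopA K (counts.sum.toNat + 1) counts 0

-- ===== PORT B =====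
def pvFeas (counts : List Int) (m : Int) : Int := (counts.map (fun c => min c m)).sum

-- B's while-loop; fuel (hi - lo).toNat is enough since the gap shrinks every iteration.
def pvBS (K : Int) (counts : List Int) : Nat → Int → Int → Int
  | 0, lo, _ => lo
  | fuel+1, lo, hi =>
    if lo < hi then
      let mid := PySem.Int.floordiv (lo + hi + 1) 2
      if mid * K ≤ pvFeas counts mid then pvBS K counts fuel mid hi
      else pvBS K counts fuel lo (mid - 1)
    else lo

def max_kupcs_alt (N : Int) (K : Int) (problem_names : List String) : Int :=
  let counts := (PySem.Dict.counter (problem_names.map (fun name => ((PySem.Str.pyGet? name 0).getD ' ')))).values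
  let total := counts.sum
  let hi := PySem.Int.floordiv total K
  pvBS K counts hi.toNat 0 hi

-- ===== PRECONDITION & SPEC =====
-- Pre_ excludes K ≤ 0 (A's while-loop never terminates there) and empty problem names
-- (name[0] raises IndexError); A returns normally exactly on the admitted inputs.
def Pre_max_kupcs (N : Int) (K : Int) (problem_names : List String) : Prop :=
  1 ≤ K ∧ ∀ s ∈ problem_names, s.toList ≠ []
instance (N : Int) (K : Int) (problem_names : List String) : Decidable (Pre_max_kupcs N K problem_names) := by unfold Pre_max_kupcs; infer_instance
def pvWitness_max_kupcs : Int × Int × List String := (1, 1, ["a"])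

def Spec_max_kupcs (N : Int) (K : Int) (problem_names : List String) (out : Int) : Prop := out = max_kupcs_alt N K problem_names
instance (N : Int) (K : Int) (problem_names : List String) (out : Int) : Decidable (Spec_max_kupcs N K problem_names out) := by unfold Spec_max_kupcs; infer_instance

-- ===== CLAIM (what is proved, stated in full; the proofs are below) =====
def Claim_equal_max_kupcs : Prop := ∀ (N : Int) (K : Int) (problem_names : List String), Dom_max_kupcs N K problem_names → Pre_max_kupcs N K problem_names → Spec_max_kupcs N K problem_names (max_kupcs N K problem_names)

-- ===== LEMMAS AND PROOFS =====

lemma feas_perm {l l' : List Int} (h : l.Perm l') (R : Int) : pvFeas l R = pvFeas l' R :=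
  List.Perm.sum_eq (h.map _)

lemma feas_append (a b : List Int) (R : Int) : pvFeas (a ++ b) R = pvFeas a R + pvFeas b R := by
  simp [pvFeas]

lemma feas_filter_pos (l : List Int) (R : Int) (h0 : ∀ c ∈ l, 0 ≤ c) (hR : 0 ≤ R) :
    pvFeas (l.filter (fun c => decide (0 < c))) R = pvFeas l R := by
  induction l with
  | nil => simp [pvFeas]
  | cons c t ih =>
    have hc := h0 c (by simp)
    have ht := fun x hx => h0 x (List.mem_cons_of_mem _ hx)
    by_cases h : 0 < c
    · simp [pvFeas, h] at ih ⊢; rw [ih ht]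
    · have : c = 0 := by omega
      simp [pvFeas, h, this] at ih ⊢
      rw [ih ht]; omega

lemma sum_filter_pos (l : List Int) (h0 : ∀ c ∈ l, 0 ≤ c) :
    (l.filter (fun c => decide (0 < c))).sum = l.sum := by
  induction l with
  | nil => simp
  | cons c t ih =>
    have hc := h0 c (by simp)
    have ht := fun x hx => h0 x (List.mem_cons_of_mem _ hx)
    by_cases h : 0 < c <;> simp [h, ih ht] <;> omega

lemma feas_succ (l : List Int) (R : Int) :
    pvFeas l (R + 1) = pvFeas l R + ((l.filter (fun c => decide (R + 1 ≤ c))).length : Int) := by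
  induction l with
  | nil => simp [pvFeas]
  | cons c t ih =>
    simp only [pvFeas, List.map_cons, List.sum_cons, List.filter_cons] at ih ⊢
    by_cases h : R + 1 ≤ c <;> simp only [h, decide_true, decide_false, if_true, if_false,
      List.length_cons] <;> push_cast <;> omega

lemma feas_map_sub_one (l : List Int) (R : Int) :
    pvFeas (l.map (fun c => c - 1)) R = pvFeas l (R + 1) - l.length := by
  induction l with
  | nil => simp [pvFeas]
  | cons c t ih => simp [pvFeas] at ih ⊢; omega

lemma feas_one (l : List Int) (h : ∀ c ∈ l, 0 < c) : pvFeas l 1 = l.length := by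
  induction l with
  | nil => simp [pvFeas]
  | cons c t ih =>
    have hc := h c (by simp)
    have := ih (fun x hx => h x (List.mem_cons_of_mem _ hx))
    simp [pvFeas] at this ⊢; omega

lemma feas_nonneg (l : List Int) (R : Int) (h0 : ∀ c ∈ l, 0 ≤ c) (hR : 0 ≤ R) : 0 ≤ pvFeas l R := by
  induction l with
  | nil => simp [pvFeas]
  | cons c t ih =>
    have hc := h0 c (by simp)
    have := ih (fun x hx => h0 x (List.mem_cons_of_mem _ hx))
    simp [pvFeas] at this ⊢; omega

lemma feas_le_sum (l : List Int) (R : Int) : pvFeas l R ≤ l.sum := by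
  induction l with
  | nil => simp [pvFeas]
  | cons c t ih => simp [pvFeas] at ih ⊢; omega

lemma len_le_sum (l : List Int) (h : ∀ c ∈ l, 0 < c) : (l.length : Int) ≤ l.sum := by
  induction l with
  | nil => simp
  | cons c t ih =>
    have hc := h c (by simp)
    have := ih (fun x hx => h x (List.mem_cons_of_mem _ hx))
    simp; push_cast; omega

lemma feas_ge_count (l : List Int) (R : Int) (h0 : ∀ c ∈ l, 0 ≤ c) (hR : 0 ≤ R) :
    R * ((l.filter (fun c => decide (R ≤ c))).length : Int) ≤ pvFeas l R := by
  induction l with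
  | nil => simp [pvFeas]
  | cons c t ih =>
    have hc := h0 c (by simp)
    have ht := ih (fun x hx => h0 x (List.mem_cons_of_mem _ hx))
    simp only [pvFeas, List.map_cons, List.sum_cons, List.filter_cons] at ht ⊢
    by_cases h : R ≤ c
    · have hmin : min c R = R := min_eq_right h
      simp only [h, decide_true, if_true, List.length_cons, hmin]
      push_cast; nlinarith [ht]
    · have hmin : (0:Int) ≤ min c R := le_min hc hR
      rw [if_neg (by simp [h])]
      linarith [ht, hmin]

-- pointwise R * min c (R+1) ≤ (R+1) * min c R, summed over the list
lemma min_pt (c R : Int) (hc : 0 ≤ c) (hR : 0 ≤ R) :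
    R * min c (R + 1) ≤ (R + 1) * min c R := by
  rcases le_or_gt c R with h | h
  · rw [min_eq_left (by omega), min_eq_left h]; nlinarith
  · rw [min_eq_right (le_of_lt h)]
    have h1 : min c (R + 1) ≤ R + 1 := min_le_right _ _
    nlinarith

lemma feas_cross (l : List Int) (R : Int) (h0 : ∀ c ∈ l, 0 ≤ c) (hR : 0 ≤ R) :
    R * pvFeas l (R + 1) ≤ (R + 1) * pvFeas l R := by
  induction l with
  | nil => simp [pvFeas]
  | cons c t ih =>
    have hc := h0 c (by simp)
    have ht := ih (fun x hx => h0 x (List.mem_cons_of_mem _ hx))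
    have hpt := min_pt c R hc hR
    simp only [pvFeas, List.map_cons, List.sum_cons] at ht ⊢
    nlinarith [ht, hpt]

lemma feas_downstep (l : List Int) (K R : Int) (h0 : ∀ c ∈ l, 0 ≤ c) (hR : 0 ≤ R)
    (h : (R + 1) * K ≤ pvFeas l (R + 1)) : R * K ≤ pvFeas l R := by
  have key := feas_cross l R h0 hR
  nlinarith [key, h]

lemma feas_mono_down (l : List Int) (K : Int) (h0 : ∀ c ∈ l, 0 ≤ c) :
    ∀ (d : Nat) (R : Int), 0 ≤ R → (R + d) * K ≤ pvFeas l (R + d) → R * K ≤ pvFeas l R := by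
  intro d
  induction d with
  | zero => intro R hR h; simpa using h
  | succ d ih =>
    intro R hR h
    apply ih R hR
    apply feas_downstep l K (R + d) h0 (by omega)
    have hcast : (R + ((d + 1 : Nat) : Int)) = R + (d : Int) + 1 := by push_cast; ring
    rw [hcast] at h; exact h

-- one greedy round: feasibility of R+1 before ↔ feasibility of R after
lemma round_identity (s : List Int) (k : Nat) (R : Int) (hk : k ≤ s.length) :
    pvFeas s (R + 1) =
      pvFeas ((s.take k).map (fun c => c - 1) ++ s.drop k) R + k +
        (((s.drop k).filter (fun c => decide (R + 1 ≤ c))).length : Int) := by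
  conv_lhs => rw [← List.take_append_drop k s]
  rw [feas_append, feas_append, feas_map_sub_one, feas_succ (s.drop k) R]
  have : (s.take k).length = k := List.length_take_of_le hk
  rw [this]; omega

lemma round_forward (s : List Int) (K R : Int) (hK : 1 ≤ K) (hk : K.toNat ≤ s.length) (hR : 0 ≤ R)
    (hs0 : ∀ c ∈ s, 0 < c)
    (h : R * K ≤ pvFeas (((s.take K.toNat).map (fun c => c - 1) ++ s.drop K.toNat).filter (fun c => decide (0 < c))) R) :
    (R + 1) * K ≤ pvFeas s (R + 1) := by
  have hKc : (K.toNat : Int) = K := Int.toNat_of_nonneg (by omega)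
  have h0 : ∀ c ∈ (s.take K.toNat).map (fun c => c - 1) ++ s.drop K.toNat, 0 ≤ c := by
    intro c hc
    rcases List.mem_append.1 hc with h1 | h1
    · rcases List.mem_map.1 h1 with ⟨x, hx, rfl⟩
      have := hs0 x (List.mem_of_mem_take hx); omega
    · have := hs0 c (List.mem_of_mem_drop h1); omega
  rw [feas_filter_pos _ _ h0 hR] at h
  rw [round_identity s K.toNat (R) hk]
  have hT : (0:Int) ≤ (((s.drop K.toNat).filter (fun c => decide (R + 1 ≤ c))).length : Int) := by positivity
  nlinarith [h, hT, hKc.ge, hKc.le]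

lemma round_backward (s : List Int) (K R : Int) (hK : 1 ≤ K) (hk : K.toNat ≤ s.length) (hR : 0 ≤ R)
    (hs0 : ∀ c ∈ s, 0 < c) (hsort : s.Pairwise (fun a b => b ≤ a))
    (h : (R + 1) * K ≤ pvFeas s (R + 1)) :
    R * K ≤ pvFeas (((s.take K.toNat).map (fun c => c - 1) ++ s.drop K.toNat).filter (fun c => decide (0 < c))) R := by
  have hKc : (K.toNat : Int) = K := Int.toNat_of_nonneg (by omega)
  set s2 := (s.take K.toNat).map (fun c => c - 1) ++ s.drop K.toNat with hs2
  have h0 : ∀ c ∈ s2, 0 ≤ c := by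
    intro c hc
    rcases List.mem_append.1 hc with h1 | h1
    · rcases List.mem_map.1 h1 with ⟨x, hx, rfl⟩
      have := hs0 x (List.mem_of_mem_take hx); omega
    · have := hs0 c (List.mem_of_mem_drop h1); omega
  rw [feas_filter_pos _ _ h0 hR]
  have hid := round_identity s K.toNat R hk
  set T := (((s.drop K.toNat).filter (fun c => decide (R + 1 ≤ c))).length : Int) with hT
  by_cases hT0 : T = 0
  · rw [← hs2] at hid; nlinarith [hid, h, hKc.le, hKc.ge]
  · -- some dropped element is ≥ R+1, hence all K taken elements were ≥ R+1
    have hTnn : (0:Int) ≤ T := by rw [hT]; positivity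
    have hTpos : (0:Int) < T := by omega
    have hne : ((s.drop K.toNat).filter (fun c => decide (R + 1 ≤ c))) ≠ [] := by
      intro hnil; rw [hT, hnil] at hTpos; simp at hTpos
    obtain ⟨b, hb⟩ := List.exists_mem_of_ne_nil _ hne
    have hbmem : b ∈ s.drop K.toNat ∧ R + 1 ≤ b := by
      have := List.mem_filter.1 hb
      exact ⟨this.1, by simpa using this.2⟩
    have hsplit : List.Pairwise (fun a b => b ≤ a) (s.take K.toNat ++ s.drop K.toNat) := by
      rw [List.take_append_drop]; exact hsort
    have hcross := (List.pairwise_append.1 hsplit).2.2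
    have htake : ∀ a ∈ s.take K.toNat, R + 1 ≤ a := fun a ha =>
      le_trans hbmem.2 (hcross a ha b hbmem.1)
    have hself : ((s.take K.toNat).map (fun c => c - 1)).filter (fun c => decide (R ≤ c)) =
        (s.take K.toNat).map (fun c => c - 1) := by
      apply List.filter_eq_self.2
      intro a ha
      rcases List.mem_map.1 ha with ⟨x, hx, rfl⟩
      have := htake x hx
      simp only [decide_eq_true_eq]; omega
    have hcount := feas_ge_count s2 R h0 hR
    have hlen : (K.toNat : Int) ≤ ((s2.filter (fun c => decide (R ≤ c))).length : Int) := by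
      rw [hs2, List.filter_append, hself, List.length_append, List.length_map,
        List.length_take_of_le hk]
      push_cast; omega
    calc R * K = R * (K.toNat : Int) := by rw [hKc]
      _ ≤ R * ((s2.filter (fun c => decide (R ≤ c))).length : Int) := by nlinarith [hlen]
      _ ≤ pvFeas s2 R := hcount

lemma sum_map_sub_one (l : List Int) : (l.map (fun c => c - 1)).sum = l.sum - l.length := by
  induction l with
  | nil => simp
  | cons c t ih => simp only [List.map_cons, List.sum_cons, List.length_cons, ih]; push_cast; omega

-- A's loop computes some g with g*K ≤ feas g and ¬((g+1)*K ≤ feas (g+1))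
lemma loopA_spec (K : Int) (hK : 1 ≤ K) :
    ∀ (fuel : Nat) (counts : List Int) (ans : Int), (∀ c ∈ counts, 0 < c) →
      counts.sum.toNat < fuel →
      ∃ g : Int, pvLoopA K fuel counts ans = ans + g ∧ 0 ≤ g ∧
        g * K ≤ pvFeas counts g ∧ ¬ ((g + 1) * K ≤ pvFeas counts (g + 1)) := by
  intro fuel
  induction fuel with
  | zero => intro counts ans _ hf; omega
  | succ fuel ih =>
    intro counts ans hpos hf
    by_cases hlen : K ≤ (counts.length : Int)
    · -- one round executes
      set s := PySem.List.sorted counts (fun x => x) true with hs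
      have hperm : s.Perm counts := PySem.List.sorted_perm counts _ true
      have hslen : s.length = counts.length := hperm.length_eq
      have hspos : ∀ c ∈ s, 0 < c := fun c hc => hpos c (hperm.mem_iff.1 hc)
      have hk : K.toNat ≤ s.length := by omega
      have hKc : (K.toNat : Int) = K := Int.toNat_of_nonneg (by omega)
      set s2 := (s.take K.toNat).map (fun c => c - 1) ++ s.drop K.toNat with hs2
      have h0 : ∀ c ∈ s2, 0 ≤ c := by
        intro c hc
        rcases List.mem_append.1 hc with h1 | h1
        · rcases List.mem_map.1 h1 with ⟨x, hx, rfl⟩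
          have := hspos x (List.mem_of_mem_take hx); omega
        · have := hspos c (List.mem_of_mem_drop h1); omega
      set s3 := s2.filter (fun c => decide (0 < c)) with hs3
      have h3pos : ∀ c ∈ s3, 0 < c := by
        intro c hc
        have := List.mem_filter.1 hc
        simpa using this.2
      have hsum2 : s2.sum = counts.sum - K := by
        rw [hs2, List.sum_append, sum_map_sub_one, List.length_take_of_le hk]
        have htd : (s.take K.toNat).sum + (s.drop K.toNat).sum = s.sum := by
          rw [← List.sum_append, List.take_append_drop]
        have := hperm.sum_eq
        omega
      have hsum3 : s3.sum = counts.sum - K := by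
        rw [hs3, sum_filter_pos s2 h0, hsum2]
      have hlensum : (counts.length : Int) ≤ counts.sum := len_le_sum counts hpos
      have hf3 : s3.sum.toNat < fuel := by omega
      obtain ⟨g, hgeq, hg0, hgfeas, hgnot⟩ := ih s3 (ans + 1) h3pos hf3
      refine ⟨g + 1, ?_, by omega, ?_, ?_⟩
      · show pvLoopA K (fuel + 1) counts ans = ans + (g + 1)
        rw [pvLoopA, if_pos hlen]
        rw [← hs, ← hs2, ← hs3] at *
        rw [hgeq]; ring
      · have hfw := round_forward s K g hK hk hg0 hspos (by rw [← hs2, ← hs3] at *; exact hgfeas)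
        rw [feas_perm hperm.symm]; exact hfw
      · intro hcon
        apply hgnot
        have hsort : s.Pairwise (fun a b => b ≤ a) := by
          have := PySem.List.sorted_pairwise_rev counts (fun x => x)
          simpa using this
        have hbw := round_backward s K (g + 1) hK hk (by omega) hspos hsort
          (by rw [feas_perm hperm.symm] at hcon; exact hcon)
        rw [← hs2, ← hs3] at hbw
        exact hbw
    · -- loop exits immediately
      refine ⟨0, ?_, le_refl 0, ?_, ?_⟩
      · show pvLoopA K (fuel + 1) counts ans = ans + 0
        rw [pvLoopA, if_neg hlen]; ring
      · have := feas_nonneg counts 0 (fun c hc => le_of_lt (hpos c hc)) (le_refl 0)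
        simpa using this
      · have h1 : pvFeas counts 1 = counts.length := feas_one counts hpos
        intro hcon
        simp only [zero_add, one_mul] at hcon
        rw [h1] at hcon
        exact hlen hcon

lemma pvBS_spec (K : Int) (counts : List Int) (G : Int)
    (hfeas : ∀ r : Int, 0 ≤ r → r ≤ G → r * K ≤ pvFeas counts r)
    (hbnd : ∀ r : Int, 0 ≤ r → r * K ≤ pvFeas counts r → r ≤ G) :
    ∀ (fuel : Nat) (lo hi : Int), lo ≤ G → G ≤ hi → (hi - lo).toNat ≤ fuel → 0 ≤ lo →
      pvBS K counts fuel lo hi = G := by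
  intro fuel
  induction fuel with
  | zero =>
    intro lo hi h1 h2 h3 h4
    have : lo = G := by omega
    simpa [pvBS] using this
  | succ fuel ih =>
    intro lo hi h1 h2 h3 h4
    rw [pvBS]
    by_cases hlt : lo < hi
    · rw [if_pos hlt]
      have hmid := PySem.Int.floordiv_two_mid_bounds (lo := lo + 1) (hi := hi) (by omega)
      have hexp : lo + 1 + hi = lo + hi + 1 := by ring
      rw [hexp] at hmid
      set mid := PySem.Int.floordiv (lo + hi + 1) 2 with hm
      by_cases hfm : mid * K ≤ pvFeas counts mid
      · rw [if_pos hfm]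
        have hmG : mid ≤ G := hbnd mid (by omega) hfm
        exact ih mid hi hmG h2 (by omega) (by omega)
      · rw [if_neg hfm]
        have hGm : G < mid := by
          by_contra hle
          exact hfm (hfeas mid (by omega) (by omega))
        exact ih lo (mid - 1) h1 (by omega) (by omega) h4
    · rw [if_neg hlt]
      omega

lemma counter_values_pos {κ : Type} [DecidableEq κ] (xs : List κ) :
    ∀ v ∈ (PySem.Dict.counter xs).values, 0 < v := by
  intro v hv
  rw [PySem.Dict.values_eq_map_keys _ (PySem.Dict.nodup_keys_counter xs) 0] at hv
  rcases List.mem_map.1 hv with ⟨k, hk, rfl⟩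
  rw [PySem.Dict.keys_counter] at hk
  have hmem : k ∈ xs := (PySem.Set.mem_ofList _ _).1 hk
  rw [PySem.Dict.getD_counter]
  have := List.count_pos_iff.2 hmem
  omega

-- ===== VERDICT (by name: the statement is the Claim_ definition above) =====
theorem max_kupcs_spec : Claim_equal_max_kupcs := by
  intro N K problem_names _ hpre
  obtain ⟨hK, _⟩ := hpre
  simp only [Spec_max_kupcs, max_kupcs, max_kupcs_alt]
  set counts := (PySem.Dict.counter
      (problem_names.map (fun name => ((PySem.Str.pyGet? name 0).getD ' ')))).values with hc
  have hpos : ∀ v ∈ counts, 0 < v := counter_values_pos _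
  have h0 : ∀ v ∈ counts, 0 ≤ v := fun v hv => le_of_lt (hpos v hv)
  obtain ⟨g, hgeq, hg0, hgfeas, hgnot⟩ :=
    loopA_spec K hK (counts.sum.toNat + 1) counts 0 hpos (by omega)
  rw [hgeq, zero_add]
  have hfeas : ∀ r : Int, 0 ≤ r → r ≤ g → r * K ≤ pvFeas counts r := by
    intro r hr hrg
    have hd : (r + ((g - r).toNat : Int)) = g := by
      rw [Int.toNat_of_nonneg (by omega)]; ring
    apply feas_mono_down counts K h0 (g - r).toNat r hr
    rw [hd]; exact hgfeas
  have hbnd : ∀ r : Int, 0 ≤ r → r * K ≤ pvFeas counts r → r ≤ g := by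
    intro r hr hfr
    by_contra hgt
    apply hgnot
    have hd : ((g + 1) + ((r - (g + 1)).toNat : Int)) = r := by
      rw [Int.toNat_of_nonneg (by omega)]; ring
    apply feas_mono_down counts K h0 (r - (g + 1)).toNat (g + 1) (by omega)
    rw [hd]; exact hfr
  have hsum0 : (counts.length : Int) ≤ counts.sum := len_le_sum counts hpos
  have hGhi : g ≤ PySem.Int.floordiv counts.sum K := by
    apply (PySem.Int.le_floordiv_iff_mul_le (by omega)).mpr
    have h2 := feas_le_sum counts g
    linarith [hgfeas, h2]
  exact (pvBS_spec K counts g hfeas hbnd (PySem.Int.floordiv counts.sum K).toNat 0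
    (PySem.Int.floordiv counts.sum K) hg0 hGhi (by omega) (le_refl 0)).symm
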